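-- pv_equiv track=rewrite | github.com/qsimeon/functiongemma-hackathon | fork_solutions/yggie_main.py | _word_boundary_match
-- ===== SOURCE A (Python) =====
-- def _is_word_boundary(text, start, end):
--     """Check if text[start:end] sits on word boundaries (not embedded in a larger word)."""
--     if start > 0 and text[start - 1].isalnum():
--         return False
--     if end < len(text) and text[end].isalnum():
--         return False
--     return True
--
-- def _word_boundary_match(needle, haystack):
--     """Find needle in haystack and verify it's at word boundaries."""
--     start = 0
--     while True:
--         idx = haystack.find(needle, start)
--         if idx == -1:
--             return False
--         if _is_word_boundary(haystack, idx, idx + len(needle)):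
--             return True
--         start = idx + 1
-- ===== SOURCE B (Python) =====
-- def _word_boundary_match(needle, haystack):
--     """Find needle in haystack and verify it's at word boundaries."""
--     # Stage 1: collect every left-boundary position (start of string, or just
--     # after a non-alphanumeric character) in one enumerate pass.
--     starts = [0] + [i + 1 for i, c in enumerate(haystack) if not c.isalnum()]
--     # Stage 2: test needle only at those candidate positions.
--     n = len(needle)
--     return any(
--         haystack.startswith(needle, i)
--         and (i + n == len(haystack) or not haystack[i + n].isalnum())
--         for i in starts
--     )
-- ===== Notes on version B (the rewrite author's own statement) =====
-- stated objective: alternative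
-- what changed: Instead of A's find-and-restart loop over every occurrence of the needle, B first builds in one pass the list of left-word-boundary positions (start of string and each position after a non-alphanumeric character) and then tests the needle only at those candidate positions with startswith plus a right-boundary check; positions inside words are never examined.
import Mathlib
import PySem

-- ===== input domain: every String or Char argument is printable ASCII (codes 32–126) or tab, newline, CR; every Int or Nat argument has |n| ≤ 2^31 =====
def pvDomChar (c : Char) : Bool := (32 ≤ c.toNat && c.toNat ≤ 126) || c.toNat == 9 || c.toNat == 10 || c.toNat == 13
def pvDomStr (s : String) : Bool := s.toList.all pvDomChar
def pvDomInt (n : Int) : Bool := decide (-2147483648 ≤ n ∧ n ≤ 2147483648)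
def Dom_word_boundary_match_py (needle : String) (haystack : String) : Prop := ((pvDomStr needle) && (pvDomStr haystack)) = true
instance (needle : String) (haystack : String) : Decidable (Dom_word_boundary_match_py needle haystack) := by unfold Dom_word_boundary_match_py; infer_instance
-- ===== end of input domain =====

-- B replaces A's find-and-restart loop by a staged pass: first collect all
-- left-word-boundary positions, then test the needle only at those candidates
-- (alternative decomposition; same asymptotic cost).


-- ===== PORT A =====
-- helper: Python _is_word_boundary (branch for branch; the in-range indexing
-- text[start-1] / text[end] is getD — both call sites guard the index in range)
def pvIsWordBoundary (text : List Char) (s e : Nat) : Bool :=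
  if decide (0 < s) && PySem.Chars.isalnum (text.getD (s - 1) ' ') then false
  else if decide (e < text.length) && PySem.Chars.isalnum (text.getD e ' ') then false
  else true

-- termination helper for the while-loop port (cited by decreasing_by)
theorem pvFindFrom_eq_neg_one_of_gt (s sub : List Char) (k : Nat) (hk : s.length < k) :
    PySem.Chars.findFrom s sub (k : Int) none = -1 := by
  simp only [PySem.Chars.findFrom]
  have h1 : ¬ ((k : Int) < 0) := by omega
  split <;> omega

-- the while-loop of A: start moves to idx+1 after each non-boundary match
def pvFindLoop (needle haystack : List Char) (start : Nat) : Bool :=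
  let idx := PySem.Chars.findFrom haystack needle (start : Int) none
  if hidx : idx = -1 then false
  else if pvIsWordBoundary haystack idx.toNat (idx.toNat + needle.length) then true
  else pvFindLoop needle haystack (idx.toNat + 1)
termination_by haystack.length + 2 - start
decreasing_by
  have hle : start ≤ haystack.length := by
    by_contra h
    exact hidx (pvFindFrom_eq_neg_one_of_gt haystack needle start (by omega))
  have hspec := PySem.Chars.findFrom_natCast_spec haystack needle start hle hidx
  omega

def word_boundary_match_py (needle : String) (haystack : String) : Bool :=
  pvFindLoop needle.toList haystack.toList 0

-- ===== PORT B =====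
-- Source B, step for step: starts = [0] + [i+1 for i,c in enumerate(haystack) if not c.isalnum()];
-- then any(haystack.startswith(needle, i) and right-boundary for i in starts).
-- haystack.startswith(needle, i) with 0 ≤ i ≤ len is exactly the prefix test on drop i.
def word_boundary_match_py_alt (needle : String) (haystack : String) : Bool :=
  let ns := needle.toList
  let hs := haystack.toList
  let starts : List Nat :=
    0 :: (PySem.List.enumerate hs).filterMap
      (fun p => if PySem.Chars.isalnum p.2 then none else some (p.1.toNat + 1))
  starts.any fun i =>
    ns.isPrefixOf (hs.drop i)
    && (decide (i + ns.length = hs.length) || !PySem.Chars.isalnum (hs.getD (i + ns.length) ' '))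

-- ===== PRECONDITION & SPEC =====
def Spec_word_boundary_match_py (needle : String) (haystack : String) (out : Bool) : Prop := out = word_boundary_match_py_alt needle haystack
instance (needle : String) (haystack : String) (out : Bool) : Decidable (Spec_word_boundary_match_py needle haystack out) := by unfold Spec_word_boundary_match_py; infer_instance

-- ===== CLAIM =====
def Claim_equal_word_boundary_match_py : Prop := ∀ (needle : String) (haystack : String), Dom_word_boundary_match_py needle haystack → Spec_word_boundary_match_py needle haystack (word_boundary_match_py needle haystack)

-- ===== LEMMAS AND PROOFS =====

theorem pvFindFrom_le_length (s sub : List Char) (k : Nat) :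
    PySem.Chars.findFrom s sub (k : Int) none ≤ s.length := by
  simp only [PySem.Chars.findFrom]
  have h1 : ¬ ((k : Int) < 0) := by omega
  simp only [if_neg h1]
  split
  · omega
  · split
    · omega
    · have := PySem.Chars.find_le_length (List.drop (Int.toNat k) (List.take (Int.toNat (s.length : Int)) s)) sub
      simp only [List.length_drop, List.length_take] at this
      omega

-- boundary-aligned occurrence of ns in hs at position i
def pvHit (ns hs : List Char) (i : Nat) : Prop :=
  i ≤ hs.length ∧ ns <+: hs.drop i ∧
  (i = 0 ∨ PySem.Chars.isalnum (hs.getD (i - 1) ' ') = false) ∧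
  (i + ns.length = hs.length ∨ PySem.Chars.isalnum (hs.getD (i + ns.length) ' ') = false)

theorem pvHit_len {ns hs : List Char} {i : Nat} (h : pvHit ns hs i) :
    i + ns.length ≤ hs.length := by
  have h1 := h.1
  have h2 := h.2.1.length_le
  simp only [List.length_drop] at h2
  omega

theorem pvIsWordBoundary_iff (ns hs : List Char) (i : Nat) (hle : i + ns.length ≤ hs.length)
    (hocc : ns <+: hs.drop i) (hlen : i ≤ hs.length) :
    pvIsWordBoundary hs i (i + ns.length) = true ↔ pvHit ns hs i := by
  unfold pvIsWordBoundary pvHit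
  constructor
  · intro h
    split_ifs at h with h1 h2
    simp only [Bool.and_eq_true, decide_eq_true_eq, not_and, Bool.not_eq_true] at h1 h2
    refine ⟨hlen, hocc, ?_, ?_⟩
    · rcases Nat.eq_zero_or_pos i with h0 | h0
      · exact Or.inl h0
      · exact Or.inr (by simpa [h0] using h1)
    · rcases lt_or_ge (i + ns.length) hs.length with hl | hl
      · exact Or.inr (by simpa [hl] using h2)
      · exact Or.inl (by omega)
  · rintro ⟨-, -, hb1, hb2⟩
    rw [if_neg, if_neg]
    · simp only [Bool.and_eq_true, decide_eq_true_eq, not_and, Bool.not_eq_true]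
      intro hl
      rcases hb2 with h0 | h0
      · omega
      · exact h0
    · simp only [Bool.and_eq_true, decide_eq_true_eq, not_and, Bool.not_eq_true]
      intro h0
      rcases hb1 with h1 | h1
      · omega
      · exact h1

-- membership in B's candidate list = left-boundary position
theorem pvStarts_mem (hs : List Char) (i : Nat) :
    (i ∈ (0 : Nat) :: (PySem.List.enumerate hs).filterMap
        (fun p => if PySem.Chars.isalnum p.2 then none else some (p.1.toNat + 1))) ↔
      (i = 0 ∨ (0 < i ∧ i ≤ hs.length ∧
        PySem.Chars.isalnum (hs.getD (i - 1) ' ') = false)) := by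
  simp only [List.mem_cons, List.mem_filterMap, PySem.List.mem_enumerate_iff]
  constructor
  · rintro (rfl | ⟨p, ⟨k, hk, rfl⟩, hif⟩)
    · exact Or.inl rfl
    · simp only [Int.zero_add] at hif
      split_ifs at hif with hal
      simp only [Option.some.injEq, Int.toNat_natCast] at hif
      refine Or.inr ⟨by omega, by omega, ?_⟩
      have hi : i - 1 = k := by omega
      rw [hi, List.getD_eq_getElem hs ' ' hk]
      simpa using hal
  · rintro (rfl | ⟨hpos, hle, hal⟩)
    · exact Or.inl rfl
    · refine Or.inr ⟨((i:Int) - 1, hs[i-1]'(by omega)), ⟨i - 1, by omega, ?_⟩, ?_⟩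
      · simp only [Prod.mk.injEq]
        exact ⟨by omega, trivial⟩
      · rw [List.getD_eq_getElem hs ' ' (by omega : i - 1 < hs.length)] at hal
        simp only [hal, Bool.false_eq_true, if_false, Option.some.injEq]
        omega

theorem pvAlt_iff (needle haystack : String) :
    word_boundary_match_py_alt needle haystack = true ↔
      ∃ i, pvHit needle.toList haystack.toList i := by
  unfold word_boundary_match_py_alt
  simp only [List.any_eq_true, Bool.and_eq_true, Bool.or_eq_true, decide_eq_true_eq,
    Bool.not_eq_eq_eq_not, Bool.not_true, List.isPrefixOf_iff_prefix]
  constructor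
  · rintro ⟨i, hmem, hpre, hb2⟩
    rcases (pvStarts_mem haystack.toList i).mp hmem with rfl | ⟨-, hle, hal⟩
    · exact ⟨0, Nat.zero_le _, by simpa using hpre, Or.inl rfl, hb2⟩
    · exact ⟨i, hle, hpre, Or.inr hal, hb2⟩
  · rintro ⟨i, hlen, hocc, hb1, hb2⟩
    refine ⟨i, (pvStarts_mem haystack.toList i).mpr ?_, hocc, hb2⟩
    rcases hb1 with rfl | hal
    · exact Or.inl rfl
    · rcases Nat.eq_zero_or_pos i with rfl | hpos
      · exact Or.inl rfl
      · exact Or.inr ⟨hpos, hlen, hal⟩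

theorem pvLoop_iff (ns hs : List Char) (start : Nat) :
    pvFindLoop ns hs start = true ↔ ∃ i, start ≤ i ∧ pvHit ns hs i := by
  generalize hm : hs.length + 2 - start = m
  induction m using Nat.strong_induction_on generalizing start with
  | _ m ih =>
  rw [pvFindLoop]
  by_cases hidx : PySem.Chars.findFrom hs ns (start : Int) none = -1
  · simp only [hidx, dite_true, Bool.false_eq_true, false_iff]
    rintro ⟨i, hsi, hlen, hocc, -⟩
    by_cases hle : start ≤ hs.length
    · have hinf : ns <:+: hs.drop start := by
        rw [← PySem.Chars.isIn_iff_infix, ← PySem.Chars.exists_prefix_drop_iff_isIn]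
        refine ⟨i - start, ?_⟩
        have hii : start + (i - start) = i := by omega
        rwa [List.drop_drop, hii]
      exact ((PySem.Chars.findFrom_natCast_eq_neg_one_iff hs ns start hle).mp hidx) hinf
    · omega
  · have hle : start ≤ hs.length := by
      by_contra h
      exact hidx (pvFindFrom_eq_neg_one_of_gt hs ns start (by omega))
    obtain ⟨hge, hocc, hmin⟩ := PySem.Chars.findFrom_natCast_spec hs ns start hle hidx
    have hub := pvFindFrom_le_length hs ns start
    have hilen : (PySem.Chars.findFrom hs ns (start : Int) none).toNat ≤ hs.length := by omega
    have hl : (PySem.Chars.findFrom hs ns (start : Int) none).toNat + ns.length ≤ hs.length := by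
      have := hocc.length_le; simp only [List.length_drop] at this; omega
    by_cases hbnd : pvIsWordBoundary hs (PySem.Chars.findFrom hs ns (start : Int) none).toNat
        ((PySem.Chars.findFrom hs ns (start : Int) none).toNat + ns.length) = true
    · simp only [hidx, dite_false, hbnd, if_true, true_iff]
      exact ⟨_, by omega, (pvIsWordBoundary_iff ns hs _ hl hocc hilen).mp hbnd⟩
    · simp only [hidx, dite_false, hbnd, Bool.false_eq_true, if_false]
      rw [ih (hs.length + 2 - ((PySem.Chars.findFrom hs ns (start : Int) none).toNat + 1))
        (by omega) _ rfl]
      constructor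
      · rintro ⟨i, hi, hit⟩
        exact ⟨i, by omega, hit⟩
      · rintro ⟨i, hsi, hit⟩
        rcases Nat.lt_or_ge i ((PySem.Chars.findFrom hs ns (start : Int) none).toNat + 1) with hc | hc
        · rcases Nat.lt_or_ge i (PySem.Chars.findFrom hs ns (start : Int) none).toNat with hlt | hgeq
          · exact absurd hit.2.1 (hmin i hsi hlt)
          · have hieq : i = (PySem.Chars.findFrom hs ns (start : Int) none).toNat := by omega
            subst hieq
            exact absurd ((pvIsWordBoundary_iff ns hs _ (pvHit_len hit) hit.2.1 hit.1).mpr hit) hbnd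
        · exact ⟨i, hc, hit⟩

-- ===== VERDICT =====
theorem word_boundary_match_py_spec : Claim_equal_word_boundary_match_py := by
  intro needle haystack _
  unfold Spec_word_boundary_match_py word_boundary_match_py
  rw [Bool.eq_iff_iff, pvLoop_iff, pvAlt_iff]
  constructor
  · rintro ⟨i, -, h⟩; exact ⟨i, h⟩
  · rintro ⟨i, h⟩; exact ⟨i, Nat.zero_le i, h⟩
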